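-- pv_equiv track=rewrite | github.com/bsuchodolski/dailyprogrammer | 301_easy_looking_for_patterns.py | pattern_builder
-- ===== SOURCE A (Python) =====
-- def distinct_letter(n):
--     if (n == 0):
--         return '(\w)'
--     else:
--         return '(?=(?!\{0}))'.format(n) + distinct_letter(n-1)
--
-- def pattern_builder(sequence):
--     list_of_letters = []
--     pattern = ''
--
--     for letter in sequence:
--         if letter not in list_of_letters:
--             list_of_letters.append(letter)
--             pattern += distinct_letter(list_of_letters.index(letter))
--         else:
--             pattern += '\{0}'.format(list_of_letters.index(letter) + 1)
--
--     return pattern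
-- ===== SOURCE B (Python) =====
-- def pattern_builder(sequence):
--     groups = {}
--     parts = []
--     for letter in sequence:
--         if letter in groups:
--             parts.append('\\{0}'.format(groups[letter] + 1))
--         else:
--             n = len(groups)
--             groups[letter] = n
--             prefix = ''
--             for i in range(n, 0, -1):
--                 prefix += '(?=(?!\\{0}))'.format(i)
--             parts.append(prefix + '(\\w)')
--     return ''.join(parts)
-- ===== Notes on version B (the rewrite author's own statement) =====
-- stated objective: alternative
-- what changed: Replaces the list-scan (`in` + list.index per character) and the recursive lookahead helper with a letter-to-group-index dict, an iterative descending-range prefix builder, and a parts list joined once at the end.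
import Mathlib
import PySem

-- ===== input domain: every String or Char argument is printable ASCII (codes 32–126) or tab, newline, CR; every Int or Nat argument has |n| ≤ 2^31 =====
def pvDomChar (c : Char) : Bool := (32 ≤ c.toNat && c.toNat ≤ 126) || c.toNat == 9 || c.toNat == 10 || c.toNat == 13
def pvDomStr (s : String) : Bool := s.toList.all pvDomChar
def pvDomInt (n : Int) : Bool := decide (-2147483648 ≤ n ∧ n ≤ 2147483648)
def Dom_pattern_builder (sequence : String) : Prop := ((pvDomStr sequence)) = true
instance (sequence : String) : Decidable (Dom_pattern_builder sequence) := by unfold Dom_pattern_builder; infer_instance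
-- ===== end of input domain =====

-- B replaces A's list scans + recursive helper + string concatenation by a letter→index dict,
-- an iterative lookahead-prefix loop and a single join of collected parts (objective: alternative decomposition).


-- ===== PORT A =====
-- helper distinct_letter(n): recursion exactly as in A ('\{0}'.format(n) via PySem.Int.toChars)
def distinctLetter : Nat → List Char
  | 0 => "(\\w)".toList
  | (n+1) => "(?=(?!\\".toList ++ PySem.Int.toChars ((n : Int) + 1) ++ "))".toList ++ distinctLetter n

-- one iteration of A's for-loop; state = (list_of_letters, pattern).
-- list.index always succeeds here (membership was just tested / the letter just appended), so .getD 0 is exact.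
def stepA (st : List Char × List Char) (letter : Char) : List Char × List Char :=
  if letter ∉ st.1 then
    let lst := st.1 ++ [letter]
    (lst, st.2 ++ distinctLetter ((PySem.List.index? lst letter).getD 0))
  else
    (st.1, st.2 ++ '\\' :: PySem.Int.toChars ((((PySem.List.index? st.1 letter).getD 0 : Nat) : Int) + 1))

def pattern_builder (sequence : String) : String :=
  String.ofList (sequence.toList.foldl stepA ([], [])).2

-- ===== PORT B =====
-- one iteration of B's for-loop; state = (groups dict, parts list).
def stepB (st : PySem.Dict Char Int × List (List Char)) (letter : Char) :
    PySem.Dict Char Int × List (List Char) :=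
  match st.1.get? letter with
  | some g => (st.1, st.2 ++ ['\\' :: PySem.Int.toChars (g + 1)])
  | none =>
    let n := st.1.size
    (st.1.insert letter (n : Int),
     st.2 ++ [(PySem.List.pyRange (n : Int) 0 (-1)).foldl
                (fun acc i => acc ++ "(?=(?!\\".toList ++ PySem.Int.toChars i ++ "))".toList) []
              ++ "(\\w)".toList])

def pattern_builder_alt (sequence : String) : String :=
  String.ofList (PySem.Chars.join [] (sequence.toList.foldl stepB (PySem.Dict.empty, [])).2)

-- ===== PRECONDITION & SPEC =====
def Spec_pattern_builder (sequence : String) (out : String) : Prop := out = pattern_builder_alt sequence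
instance (sequence : String) (out : String) : Decidable (Spec_pattern_builder sequence out) := by unfold Spec_pattern_builder; infer_instance

-- ===== CLAIM (what is proved, stated in full; the proofs are below) =====
def Claim_equal_pattern_builder : Prop := ∀ (sequence : String), Dom_pattern_builder sequence → Spec_pattern_builder sequence (pattern_builder sequence)

-- ===== LEMMAS AND PROOFS =====

theorem join_empty (parts : List (List Char)) : PySem.Chars.join [] parts = parts.flatten := by
  induction parts with
  | nil => rfl
  | cons p ps ih =>
    simp [PySem.Chars.join, List.intercalate] at *
    cases ps <;> simp_all

-- B's dict lookup equals A's list index, whenever items = zipIdx of the letter list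
theorem get?_mk_zipIdx (lst : List Char) (s : Nat) (c : Char) :
    (PySem.Dict.mk ((lst.zipIdx s).map fun p => (p.1, (p.2 : Int)))).get? c
      = (PySem.List.index? lst c).map (fun k => ((s + k : Nat) : Int)) := by
  induction lst generalizing s with
  | nil => rfl
  | cons x xs ih =>
    rw [List.zipIdx_cons, List.map_cons, PySem.Dict.get?_mk_cons]
    by_cases hx : x = c
    · subst hx; simp [List.idxOf?_cons]
    · rw [PySem.List.index?_cons_of_ne xs hx, ih (s+1)]
      simp only [hx, if_false, beq_iff_eq, Option.map_map]
      congr 1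
      funext k
      simp
      omega

-- the iterative prefix loop ++ '(\w)' is distinct_letter
theorem prefix_eq_distinct (n : Nat) (acc : List Char) :
    (PySem.List.pyRange (n : Int) 0 (-1)).foldl
        (fun acc i => acc ++ "(?=(?!\\".toList ++ PySem.Int.toChars i ++ "))".toList) acc
      ++ "(\\w)".toList = acc ++ distinctLetter n := by
  induction n generalizing acc with
  | zero => simp [PySem.List.pyRange_neg_one_eq_nil, distinctLetter]
  | succ m ih =>
    rw [PySem.List.pyRange_neg_one_cons (by exact_mod_cast Nat.succ_pos m)]
    have h1 : ((m + 1 : Nat) : Int) - 1 = (m : Nat) := by push_cast; ring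
    rw [h1, List.foldl_cons, ih, distinctLetter]
    push_cast
    simp [List.append_assoc]

def PbInv (lst : List Char) (pat : List Char)
    (st : PySem.Dict Char Int × List (List Char)) : Prop :=
  st.1.items = (lst.zipIdx).map (fun p => (p.1, (p.2 : Int))) ∧ pat = st.2.flatten

theorem step_inv (lst pat : List Char) (st : PySem.Dict Char Int × List (List Char))
    (h : PbInv lst pat st) (letter : Char) :
    PbInv (stepA (lst, pat) letter).1 (stepA (lst, pat) letter).2 (stepB st letter) := by
  obtain ⟨d, parts⟩ := st
  obtain ⟨h1, h2⟩ := h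
  obtain ⟨ditems⟩ := d
  simp only at h1
  subst h1 h2
  have hget : (PySem.Dict.mk ((lst.zipIdx).map fun p => (p.1, (p.2 : Int)))).get? letter
      = (PySem.List.index? lst letter).map (fun k => ((0 + k : Nat) : Int)) :=
    get?_mk_zipIdx lst 0 letter
  by_cases hmem : letter ∈ lst
  · -- repeated letter: both sides append the backreference
    obtain ⟨k, hk⟩ : ∃ k, PySem.List.index? lst letter = some k := by
      have := (PySem.List.index?_isSome_iff (xs := lst) (v := letter)).2 hmem
      exact Option.isSome_iff_exists.1 this
    rw [hk] at hget
    simp only [Option.map_some] at hget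
    have hk' := hk
    rw [PySem.List.index?_eq_idxOf?] at hk'
    constructor
    · simp [stepA, stepB, hmem, hget]
    · simp [stepA, stepB, hmem, hget, hk']
  · -- new letter: A appends distinct_letter, B the iterative prefix + '(\w)'
    have hnone : PySem.List.index? lst letter = none :=
      (PySem.List.index?_eq_none_iff lst letter).2 hmem
    rw [hnone] at hget
    simp only [Option.map_none] at hget
    have hcont : (PySem.Dict.mk ((lst.zipIdx).map fun p => (p.1, (p.2 : Int)))).contains letter = false := by
      rw [PySem.Dict.contains_eq_isSome_get?, hget]; rfl
    have hsize : (PySem.Dict.mk ((lst.zipIdx).map fun p => (p.1, (p.2 : Int)))).size = lst.length := by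
      simp [PySem.Dict.size]
    have hidx : PySem.List.index? (lst ++ [letter]) letter = some lst.length :=
      PySem.List.index?_append_singleton_self lst letter hmem
    constructor
    · simp only [stepA, stepB, hmem, not_false_eq_true, if_true, hget,
        PySem.Dict.items_insert_of_not_contains _ _ hcont, hsize]
      simp [List.zipIdx_append]
    · have := prefix_eq_distinct lst.length ([] : List Char)
      simp only [List.nil_append] at this
      simp only [stepA, stepB, hmem, not_false_eq_true, if_true, hget, hidx, hsize,
        List.flatten_append, List.flatten_cons, List.flatten_nil, List.append_nil, this,
        Option.getD_some]

theorem fold_inv (cs : List Char) (lst pat : List Char)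
    (st : PySem.Dict Char Int × List (List Char)) (h : PbInv lst pat st) :
    PbInv (cs.foldl stepA (lst, pat)).1 (cs.foldl stepA (lst, pat)).2 (cs.foldl stepB st) := by
  induction cs generalizing lst pat st with
  | nil => exact h
  | cons c cs ih =>
    rw [List.foldl_cons, List.foldl_cons]
    have := step_inv lst pat st h c
    exact ih _ _ _ this

-- ===== VERDICT (by name: the statement is the Claim_ definition above) =====
theorem pattern_builder_spec : Claim_equal_pattern_builder := by
  intro sequence _
  unfold Spec_pattern_builder pattern_builder pattern_builder_alt
  have h := fold_inv sequence.toList [] [] (PySem.Dict.empty, []) ⟨rfl, rfl⟩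
  rw [join_empty, ← h.2]
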